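-- pv_equiv track=rewrite | github.com/david-lorenzo/python_aoc2020 | 14/14.py | addresses
-- ===== SOURCE A (Python) =====
-- def addresses(addr):
--     next_batch = []
--     curr_batch = [addr]
--     run = True
--     while run:
--         run = False
--         for a in curr_batch:
--             if "X" not in a:
--                 continue
--             run = True
--             i = a.index("X")
--             next_batch.append(a[:i] + "0" + a[i+1:])
--             next_batch.append(a[:i] + "1" + a[i+1:])
--         if run:
--             curr_batch, next_batch = next_batch, []
--     return curr_batch
-- ===== SOURCE B (Python) =====
-- def addresses(addr):
--     out = [[]]
--     for c in addr:
--         if c == 'X':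
--             out = [p + [b] for p in out for b in '01']
--         else:
--             for p in out:
--                 p.append(c)
--     return [''.join(p) for p in out]
-- ===== Notes on version B (the rewrite author's own statement) =====
-- stated objective: simpler
-- what changed: Replaced A's worklist loop, which repeatedly rescans each partially-expanded string to find and substitute its next wildcard, with a single left-to-right pass over the characters that extends every prefix in the output list by one character, branching into the two bit values at each wildcard.
import Mathlib
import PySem

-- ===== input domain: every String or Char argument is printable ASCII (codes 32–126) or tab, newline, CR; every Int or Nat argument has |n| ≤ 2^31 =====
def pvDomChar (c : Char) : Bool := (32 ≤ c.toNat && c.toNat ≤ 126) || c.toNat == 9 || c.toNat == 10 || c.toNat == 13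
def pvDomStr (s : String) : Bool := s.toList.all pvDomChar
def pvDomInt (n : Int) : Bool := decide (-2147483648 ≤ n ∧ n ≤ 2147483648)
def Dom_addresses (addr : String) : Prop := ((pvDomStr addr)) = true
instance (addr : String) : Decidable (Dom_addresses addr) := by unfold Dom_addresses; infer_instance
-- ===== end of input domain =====

-- B replaces A's worklist loop (which rescans every partially-expanded string for its next 'X')
-- with a single left-to-right pass extending all prefixes character by character; objective: simpler.


-- ===== PORT A =====
-- a[:i] + b + a[i+1:]  where i = a.index("X")  (index = Chars.find, exact: guarded by '"X" in a')
def replA (a : List Char) (b : Char) : List Char :=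
  PySem.Chars.slice a none (some (PySem.Chars.find a ['X'])) ++ [b] ++
    PySem.Chars.slice a (some (PySem.Chars.find a ['X'] + 1)) none

-- body of the 'for a in curr_batch' loop; state = (run, next_batch)
def stepA (st : Bool × List (List Char)) (a : List Char) : Bool × List (List Char) :=
  if PySem.Chars.isIn ['X'] a = false then st
  else (true, st.2 ++ [replA a '0', replA a '1'])

-- the 'while run' loop; the fuel only totalizes it (count 'X' + 1 rounds always suffice)
def loopA : Nat → List (List Char) → List (List Char)
  | 0, batch => batch
  | fuel + 1, batch =>
    let st := batch.foldl stepA (false, [])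
    if st.1 then loopA fuel st.2 else batch

def addresses (addr : String) : List String :=
  (loopA (addr.toList.count 'X' + 1) [addr.toList]).map (fun l => String.ofList l)

-- ===== PORT B =====
-- loop body: out = [p + b for p in out for b in '01'] if c == 'X' else [p + c for p in out]
def stepB (out : List (List Char)) (c : Char) : List (List Char) :=
  if c = 'X' then out.flatMap (fun p => ['0', '1'].map (fun b => p ++ [b]))
  else out.map (fun p => p ++ [c])

def addresses_alt (addr : String) : List String :=
  (addr.toList.foldl stepB [[]]).map (fun l => String.ofList l)

-- ===== PRECONDITION & SPEC =====
def Spec_addresses (addr : String) (out : List String) : Prop := out = addresses_alt addr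
instance (addr : String) (out : List String) : Decidable (Spec_addresses addr out) := by unfold Spec_addresses; infer_instance

-- ===== CLAIM (what is proved, stated in full; the proofs are below) =====
def Claim_equal_addresses : Prop := ∀ (addr : String), Dom_addresses addr → Spec_addresses addr (addresses addr)

-- ===== LEMMAS AND PROOFS =====

def exp : List Char → List (List Char)
  | [] => [[]]
  | c :: cs =>
    if c = 'X' then (exp cs).map ('0' :: ·) ++ (exp cs).map ('1' :: ·)
    else (exp cs).map (c :: ·)

theorem hasX_iff (a : List Char) : PySem.Chars.isIn ['X'] a = true ↔ 'X' ∈ a := by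
  rw [PySem.Chars.isIn_iff_infix, List.singleton_infix_iff]

theorem exp_noX (a : List Char) (h : 'X' ∉ a) : exp a = [a] := by
  induction a with
  | nil => rfl
  | cons c cs ih =>
    simp only [List.mem_cons, not_or] at h
    simp [exp, Ne.symm h.1, ih h.2]

theorem exp_prefix (pre t : List Char) (h : 'X' ∉ pre) :
    exp (pre ++ t) = (exp t).map (pre ++ ·) := by
  induction pre with
  | nil => simp
  | cons c cs ih =>
    simp only [List.mem_cons, not_or] at h
    simp [exp, Ne.symm h.1, ih h.2, Function.comp_def]

theorem find_decomp (a : List Char) (h : 'X' ∈ a) :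
    ∃ pre suf, a = pre ++ 'X' :: suf ∧ 'X' ∉ pre ∧
      PySem.Chars.find a ['X'] = pre.length := by
  have hin : ['X'] <:+: a := (List.singleton_infix_iff 'X' a).2 h
  have hnn : 0 ≤ PySem.Chars.find a ['X'] := (PySem.Chars.find_nonneg_iff a ['X']).2 hin
  obtain ⟨hpre, hmin⟩ := PySem.Chars.find_spec (s := a) (sub := ['X']) hnn
  set n : Nat := (PySem.Chars.find a ['X']).toNat with hn
  have hne : a.drop n ≠ [] := by
    intro he; rw [he] at hpre; exact (by simpa using hpre.length_le)
  have hlt : n < a.length := by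
    rcases Nat.lt_or_ge n a.length with h' | h'; · exact h'
    exact absurd (List.drop_eq_nil_of_le h') hne
  have hd : a.drop n = 'X' :: a.drop (n + 1) := by
    have := List.drop_eq_getElem_cons hlt
    obtain ⟨t, ht⟩ := hpre
    rw [this]; rw [this] at ht
    have hx : a[n]?.getD 'q' = 'X' := by simpa using congrArg (fun l => l.headD 'q') ht.symm
    rw [List.getElem?_eq_getElem hlt] at hx
    simp at hx
    rw [hx]
  refine ⟨a.take n, a.drop (n + 1), ?_, ?_, ?_⟩
  · rw [← hd, List.take_append_drop]
  · intro hmem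
    obtain ⟨j, hj, hja⟩ := List.getElem_of_mem hmem
    have hjlt : j < n := by simp at hj; exact hj.1
    have : ['X'] <+: a.drop j := by
      rw [List.drop_eq_getElem_cons (hjlt.trans hlt)]
      simp [List.getElem_take] at hja
      simp [hja]
    exact hmin j hjlt this
  · simp [List.length_take, hn, Int.toNat_of_nonneg hnn] at *
    omega

theorem first_uniq (pre pre' suf suf' : List Char) (h : 'X' ∉ pre) (h' : 'X' ∉ pre')
    (he : pre ++ 'X' :: suf = pre' ++ 'X' :: suf') : pre = pre' ∧ suf = suf' := by
  induction pre generalizing pre' with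
  | nil =>
    cases pre' with
    | nil => simpa using he
    | cons c cs =>
      simp only [List.nil_append, List.cons_append, List.cons.injEq] at he
      simp only [List.mem_cons, not_or] at h'
      exact (h'.1 he.1).elim
  | cons c cs ih =>
    cases pre' with
    | nil =>
      simp only [List.cons_append, List.nil_append, List.cons.injEq] at he
      simp only [List.mem_cons, not_or] at h
      exact (h.1 he.1.symm).elim
    | cons d ds =>
      simp only [List.cons_append, List.cons.injEq] at he
      simp only [List.mem_cons, not_or] at h h'
      obtain ⟨h1, h2⟩ := ih ds h.2 h'.2 he.2
      exact ⟨by rw [he.1, h1], h2⟩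

theorem replA_eq (pre suf : List Char) (b : Char) (h : 'X' ∉ pre) :
    replA (pre ++ 'X' :: suf) b = pre ++ b :: suf := by
  obtain ⟨p, s, he, hp, hf⟩ := find_decomp (pre ++ 'X' :: suf) (by simp)
  obtain ⟨h1, h2⟩ := first_uniq p pre s suf hp h he.symm
  rw [h1] at hf
  unfold replA
  rw [hf]
  have h1 : PySem.Chars.slice (pre ++ 'X' :: suf) none (some (pre.length : Int)) = pre := by
    simp [PySem.List.slice_to_natCast]
  have h2 : PySem.Chars.slice (pre ++ 'X' :: suf) (some ((pre.length : Int) + 1)) none = suf := by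
    have : (pre.length : Int) + 1 = ((pre.length + 1 : Nat) : Int) := by push_cast; ring
    rw [this, PySem.Chars.slice_eq_listSlice, PySem.List.slice_from_natCast]
    rw [show pre ++ 'X' :: suf = (pre ++ ['X']) ++ suf by simp]
    rw [show pre.length + 1 = (pre ++ ['X']).length by simp]
    exact List.drop_left
  rw [h1, h2]
  simp

theorem exp_split (a : List Char) (h : 'X' ∈ a) :
    exp a = exp (replA a '0') ++ exp (replA a '1') := by
  obtain ⟨pre, suf, he, hp, _⟩ := find_decomp a h
  subst he
  rw [replA_eq _ _ _ hp, replA_eq _ _ _ hp,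
      exp_prefix _ _ hp, exp_prefix _ _ hp, exp_prefix _ _ hp]
  simp [exp, Function.comp_def]

theorem count_replA (a : List Char) (h : 'X' ∈ a) (b : Char) (hb : b ≠ 'X') :
    (replA a b).count 'X' + 1 = a.count 'X' := by
  obtain ⟨pre, suf, he, hp, _⟩ := find_decomp a h
  subst he
  rw [replA_eq _ _ _ hp]
  have h0 : pre.count 'X' = 0 := List.count_eq_zero.2 hp
  simp [List.count_append, h0, hb]

theorem foldA_hasX (batch : List (List Char)) (r : Bool) (acc : List (List Char))
    (h : ∀ a ∈ batch, 'X' ∈ a) :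
    batch.foldl stepA (r, acc) =
      ((r || !batch.isEmpty), acc ++ batch.flatMap (fun a => [replA a '0', replA a '1'])) := by
  induction batch generalizing r acc with
  | nil => simp
  | cons a rest ih =>
    have hx : PySem.Chars.isIn ['X'] a = true := (hasX_iff a).2 (h a (by simp))
    simp only [List.foldl_cons, stepA, hx]
    rw [if_neg (by simp)]
    rw [ih true _ (fun b hb => h b (by simp [hb]))]
    simp

theorem foldA_noX (batch : List (List Char)) (r : Bool) (acc : List (List Char))
    (h : ∀ a ∈ batch, 'X' ∉ a) :
    batch.foldl stepA (r, acc) = (r, acc) := by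
  induction batch generalizing r acc with
  | nil => rfl
  | cons a rest ih =>
    have hx : PySem.Chars.isIn ['X'] a = false := by
      rcases Bool.eq_false_or_eq_true (PySem.Chars.isIn ['X'] a) with h' | h'
      · exact absurd ((hasX_iff a).1 h') (h a (by simp))
      · exact h'
    simp only [List.foldl_cons, stepA, hx]
    exact ih r acc (fun b hb => h b (by simp [hb]))

theorem loopA_uniform (k : Nat) (batch : List (List Char))
    (h : ∀ a ∈ batch, a.count 'X' = k) :
    loopA (k + 1) batch = batch.flatMap exp := by
  induction k generalizing batch with
  | zero =>
    have hno : ∀ a ∈ batch, 'X' ∉ a := fun a ha => List.count_eq_zero.1 (h a ha)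
    have hst : batch.foldl stepA (false, []) = (false, []) := foldA_noX batch false [] hno
    have h1 : loopA 1 batch = batch := by
      rw [show loopA 1 batch = (if (batch.foldl stepA (false, [])).1 then
        loopA 0 (batch.foldl stepA (false, [])).2 else batch) from rfl, hst]
      rfl
    rw [h1, List.flatMap_congr (fun a ha => exp_noX a (hno a ha))]
    simp
  | succ k ih =>
    have hx : ∀ a ∈ batch, 'X' ∈ a := fun a ha =>
      List.count_pos_iff.1 (by rw [h a ha]; omega)
    cases batch with
    | nil => rfl
    | cons b bs =>
      rw [show loopA (k + 1 + 1) (b :: bs) =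
        (if ((b :: bs).foldl stepA (false, [])).1 then
          loopA (k + 1) ((b :: bs).foldl stepA (false, [])).2 else (b :: bs)) from rfl]
      rw [foldA_hasX _ _ _ hx]
      simp only [List.isEmpty_cons, Bool.not_false, Bool.false_or, List.nil_append]
      rw [ih _ ?_]
      · rw [List.flatMap_assoc]
        exact List.flatMap_congr (fun a ha => by
          simp only [List.flatMap_cons, List.flatMap_nil, List.append_nil]
          exact (exp_split a (hx a ha)).symm)
      · intro a ha
        simp only [List.mem_flatMap] at ha
        obtain ⟨x, hx2, hmem⟩ := ha
        have hc := h x hx2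
        simp only [List.mem_cons, List.not_mem_nil] at hmem
        rcases hmem with rfl | rfl | hF
        · have := count_replA x (hx x hx2) '0' (by decide); omega
        · have := count_replA x (hx x hx2) '1' (by decide); omega
        · exact absurd hF (by simp)

theorem foldB_eq (cs : List Char) (out : List (List Char)) :
    cs.foldl stepB out = out.flatMap (fun p => (exp cs).map (p ++ ·)) := by
  induction cs generalizing out with
  | nil => simp [exp]
  | cons c t ih =>
    by_cases hc : c = 'X'
    · subst hc
      rw [List.foldl_cons, show stepB out 'X' =
          out.flatMap (fun p => ['0', '1'].map (fun b => p ++ [b])) by simp [stepB],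
        ih, List.flatMap_assoc,
        show exp ('X' :: t) = (exp t).map ('0' :: ·) ++ (exp t).map ('1' :: ·) by simp [exp]]
      apply List.flatMap_congr
      intro p _
      simp only [List.map_cons, List.map_nil, List.flatMap_cons, List.flatMap_nil,
        List.append_nil, List.map_append, List.map_map, Function.comp_def,
        List.append_assoc, List.singleton_append]
    · rw [List.foldl_cons, show stepB out c = out.map (fun p => p ++ [c]) by simp [stepB, hc],
        ih, List.flatMap_map,
        show exp (c :: t) = (exp t).map (c :: ·) by simp [exp, hc]]
      apply List.flatMap_congr
      intro p _
      simp only [List.map_map, Function.comp_def, List.append_assoc, List.singleton_append]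

-- ===== VERDICT (by name: the statement is the Claim_ definition above) =====
theorem addresses_spec : Claim_equal_addresses := by
  intro addr _
  unfold Spec_addresses addresses addresses_alt
  rw [loopA_uniform (addr.toList.count 'X') [addr.toList] (by simp), foldB_eq]
  simp
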